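-- pv_equiv track=rewrite | github.com/arav06/navtag-hbp25 | backend/toll-booth/ultrasonic.py | is_moving
-- ===== SOURCE A (Python) =====
-- def is_moving(current_centers, previous_centers, threshold=20):
--     if not previous_centers:
--         return False
--     for c_center in current_centers:
--         for p_center in previous_centers:
--             dx = abs(c_center[0] - p_center[0])
--             dy = abs(c_center[1] - p_center[1])
--             if dx > threshold or dy > threshold:
--                 return True
--     return False
-- ===== SOURCE B (Python) =====
-- def is_moving(current_centers, previous_centers, threshold=20):
--     if not previous_centers:
--         return False
--     min_x = min(p[0] for p in previous_centers)
--     max_x = max(p[0] for p in previous_centers)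
--     min_y = min(p[1] for p in previous_centers)
--     max_y = max(p[1] for p in previous_centers)
--     for cx, cy in current_centers:
--         if (cx - min_x > threshold or max_x - cx > threshold
--                 or cy - min_y > threshold or max_y - cy > threshold):
--             return True
--     return False
-- ===== Notes on version B (the rewrite author's own statement) =====
-- stated objective: faster
-- what changed: Replaces the nested all-pairs scan by precomputing the previous centers' bounding box (min/max of x and y) once, then a single pass over current centers checking distance to the box extremes.
import Mathlib
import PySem

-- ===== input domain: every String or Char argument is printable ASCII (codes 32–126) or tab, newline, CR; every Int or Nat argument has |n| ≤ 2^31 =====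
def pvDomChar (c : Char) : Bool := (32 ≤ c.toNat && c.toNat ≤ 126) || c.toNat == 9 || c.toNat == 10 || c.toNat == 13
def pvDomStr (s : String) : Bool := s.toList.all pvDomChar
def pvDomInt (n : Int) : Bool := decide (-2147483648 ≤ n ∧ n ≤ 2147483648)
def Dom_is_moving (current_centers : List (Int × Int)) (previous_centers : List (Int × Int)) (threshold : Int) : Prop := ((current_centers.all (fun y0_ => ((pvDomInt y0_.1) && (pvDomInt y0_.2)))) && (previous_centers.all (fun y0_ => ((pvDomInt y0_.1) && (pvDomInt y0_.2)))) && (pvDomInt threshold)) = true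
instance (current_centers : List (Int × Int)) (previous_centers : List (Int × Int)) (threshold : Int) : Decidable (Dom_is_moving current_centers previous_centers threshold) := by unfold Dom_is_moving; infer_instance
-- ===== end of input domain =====

-- B replaces A's O(n*m) all-pairs scan by one bounding-box pass over previous_centers
-- followed by one pass over current_centers (faster, asymptotic).

-- ===== PORT A =====
def is_moving (current_centers : List (Int × Int)) (previous_centers : List (Int × Int)) (threshold : Int) : Bool :=
  if previous_centers = [] then false
  else
    current_centers.any (fun c_center =>
      previous_centers.any (fun p_center =>
        let dx := |c_center.1 - p_center.1|
        let dy := |c_center.2 - p_center.2|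
        decide (dx > threshold) || decide (dy > threshold)))

-- ===== PORT B =====
def is_moving_alt (current_centers : List (Int × Int)) (previous_centers : List (Int × Int)) (threshold : Int) : Bool :=
  match previous_centers with
  | [] => false
  | q :: qs =>
    let min_x := qs.foldl (fun m p => min m p.1) q.1
    let max_x := qs.foldl (fun m p => max m p.1) q.1
    let min_y := qs.foldl (fun m p => min m p.2) q.2
    let max_y := qs.foldl (fun m p => max m p.2) q.2
    current_centers.any (fun c =>
      decide (c.1 - min_x > threshold) || decide (max_x - c.1 > threshold) ||
      decide (c.2 - min_y > threshold) || decide (max_y - c.2 > threshold))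

-- ===== PRECONDITION & SPEC =====
def Spec_is_moving (current_centers : List (Int × Int)) (previous_centers : List (Int × Int)) (threshold : Int) (out : Bool) : Prop := out = is_moving_alt current_centers previous_centers threshold
instance (current_centers : List (Int × Int)) (previous_centers : List (Int × Int)) (threshold : Int) (out : Bool) : Decidable (Spec_is_moving current_centers previous_centers threshold out) := by unfold Spec_is_moving; infer_instance

-- ===== CLAIM (what is proved, stated in full; the proofs are below) =====
def Claim_equal_is_moving : Prop := ∀ (current_centers : List (Int × Int)) (previous_centers : List (Int × Int)) (threshold : Int), Dom_is_moving current_centers previous_centers threshold → Spec_is_moving current_centers previous_centers threshold (is_moving current_centers previous_centers threshold)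

-- ===== LEMMAS AND PROOFS =====

-- Core invariant: "some element of ps (or the box seeded by a,b,c,d) exceeds the
-- threshold" is the same as the box condition after folding min/max over ps.
theorem pv_core (cx cy th : Int) (ps : List (Int × Int)) :
    ∀ (a b c d : Int),
    ((∃ p ∈ ps, th < |cx - p.1| ∨ th < |cy - p.2|) ∨
      (th < cx - a ∨ th < b - cx ∨ th < cy - c ∨ th < d - cy))
    ↔ (th < cx - ps.foldl (fun m p => min m p.1) a ∨
       th < ps.foldl (fun m p => max m p.1) b - cx ∨
       th < cy - ps.foldl (fun m p => min m p.2) c ∨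
       th < ps.foldl (fun m p => max m p.2) d - cy) := by
  induction ps with
  | nil => intro a b c d; simp
  | cons p ps ih =>
    intro a b c d
    simp only [List.foldl_cons, List.mem_cons]
    rw [← ih (min a p.1) (max b p.1) (min c p.2) (max d p.2)]
    have key : (th < |cx - p.1| ∨ th < |cy - p.2|) ∨
        (th < cx - a ∨ th < b - cx ∨ th < cy - c ∨ th < d - cy) ↔
        (th < cx - min a p.1 ∨ th < max b p.1 - cx ∨
         th < cy - min c p.2 ∨ th < max d p.2 - cy) := by
      rw [lt_abs, lt_abs]
      omega
    constructor
    · rintro (⟨p', hp', hc⟩ | hb)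
      · rcases hp' with rfl | hp'
        · exact Or.inr (key.mp (Or.inl hc))
        · exact Or.inl ⟨p', hp', hc⟩
      · exact Or.inr (key.mp (Or.inr hb))
    · rintro (⟨p', hp', hc⟩ | hb)
      · exact Or.inl ⟨p', Or.inr hp', hc⟩
      · rcases key.mpr hb with hc | hb'
        · exact Or.inl ⟨p, Or.inl rfl, hc⟩
        · exact Or.inr hb'

theorem pv_pointwise (q : Int × Int) (qs : List (Int × Int)) (c : Int × Int) (th : Int) :
    ((q :: qs).any (fun p =>
        let dx := |c.1 - p.1|
        let dy := |c.2 - p.2|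
        decide (dx > th) || decide (dy > th)))
    = (decide (c.1 - qs.foldl (fun m p => min m p.1) q.1 > th) ||
       decide (qs.foldl (fun m p => max m p.1) q.1 - c.1 > th) ||
       decide (c.2 - qs.foldl (fun m p => min m p.2) q.2 > th) ||
       decide (qs.foldl (fun m p => max m p.2) q.2 - c.2 > th)) := by
  rw [Bool.eq_iff_iff]
  simp only [List.any_eq_true, Bool.or_eq_true, decide_eq_true_iff, List.mem_cons, gt_iff_lt]
  have hcore := pv_core c.1 c.2 th qs q.1 q.1 q.2 q.2
  set mnx := qs.foldl (fun m p => min m p.1) q.1 with hmnx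
  set mxx := qs.foldl (fun m p => max m p.1) q.1 with hmxx
  set mny := qs.foldl (fun m p => min m p.2) q.2 with hmny
  set mxy := qs.foldl (fun m p => max m p.2) q.2 with hmxy
  have hq : (th < |c.1 - q.1| ∨ th < |c.2 - q.2|) ↔
      (th < c.1 - q.1 ∨ th < q.1 - c.1 ∨ th < c.2 - q.2 ∨ th < q.2 - c.2) := by
    rw [lt_abs, lt_abs]; omega
  constructor
  · rintro ⟨p', hp', hc⟩
    have hbox : _ := hcore.mp (by
      rcases hp' with rfl | h
      · exact Or.inr (hq.mp hc)
      · exact Or.inl ⟨p', h, hc⟩)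
    rcases hbox with h1 | h2 | h3 | h4
    · exact Or.inl (Or.inl (Or.inl h1))
    · exact Or.inl (Or.inl (Or.inr h2))
    · exact Or.inl (Or.inr h3)
    · exact Or.inr h4
  · intro h
    have h' := hcore.mpr (by
      rcases h with ((h1 | h2) | h3) | h4
      · exact Or.inl h1
      · exact Or.inr (Or.inl h2)
      · exact Or.inr (Or.inr (Or.inl h3))
      · exact Or.inr (Or.inr (Or.inr h4)))
    rcases h' with ⟨p', hp', hc⟩ | hb
    · exact ⟨p', Or.inr hp', hc⟩
    · exact ⟨q, Or.inl rfl, hq.mpr hb⟩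

-- ===== VERDICT (by name: the statement is the Claim_ definition above) =====
theorem is_moving_spec : Claim_equal_is_moving := by
  intro cur prev th _
  unfold Spec_is_moving is_moving is_moving_alt
  cases prev with
  | nil => simp
  | cons q qs =>
    simp only [reduceCtorEq, if_false]
    exact congrArg cur.any (funext fun c => pv_pointwise q qs c th)
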